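-- pv_equiv track=rewrite | github.com/luanshiyinyang/LCNotes | Problems/other-003/solve.py | solve
-- ===== SOURCE A (Python) =====
-- from typing import List
--
-- def cal(num, i, j):
--     # 计算num的i位到j位组成的十进制数
--     value = 0
--     while j >= i:
--         value = value * 10 + num[i]
--         i = i + 1
--     return value
--
-- def solve(num: List[int], n, k):
--     if k > n:
--         return 0
--     dp = [[0] * k for _ in range(n)]
--     # 对于任何前i位拆为一段，最大乘积都是本身
--     for i in range(n):
--         dp[i][0] = cal(num, 0, i)
--
--     for j in range(1, k):
--         for i in range(j, n):
--             dp[i][j] = max([dp[m][j - 1] * cal(num, m + 1, i) for m in range(i)])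
--
--     return dp[n - 1][k - 1]
-- ===== SOURCE B (Python) =====
-- def solve(num, n, k):
--     if k > n:
--         return 0
--     # val[i] = [0]*i + [value of digits i..j for j in i..n-1]; built once in O(n^2)
--     val = []
--     for i in range(n):
--         row = [0] * i
--         v = 0
--         for j in range(i, n):
--             v = v * 10 + num[j]
--             row.append(v)
--         val.append(row)
--     # rolling 1-D DP over the number of segments
--     prev = list(val[0])
--     for j in range(1, k):
--         cur = []
--         for i in range(n):
--             if i < j:
--                 cur.append(0)
--             else:
--                 cur.append(max(prev[m] * val[m + 1][i] for m in range(i)))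
--         prev = cur
--     return prev[n - 1]
-- ===== Notes on version B (the rewrite author's own statement) =====
-- stated objective: alternative
-- what changed: B precomputes a triangular table of all segment values once via the v=v*10+digit recurrence instead of A's per-lookup cal() digit loop, and replaces A's 2-D dp table with a rolling 1-D column; it does asymptotically fewer digit-loop steps (O(k*n^2) table lookups vs O(k*n^3) cal steps), though on measured inputs the big-integer products dominate both, so no measured speed is claimed.
import Mathlib
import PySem

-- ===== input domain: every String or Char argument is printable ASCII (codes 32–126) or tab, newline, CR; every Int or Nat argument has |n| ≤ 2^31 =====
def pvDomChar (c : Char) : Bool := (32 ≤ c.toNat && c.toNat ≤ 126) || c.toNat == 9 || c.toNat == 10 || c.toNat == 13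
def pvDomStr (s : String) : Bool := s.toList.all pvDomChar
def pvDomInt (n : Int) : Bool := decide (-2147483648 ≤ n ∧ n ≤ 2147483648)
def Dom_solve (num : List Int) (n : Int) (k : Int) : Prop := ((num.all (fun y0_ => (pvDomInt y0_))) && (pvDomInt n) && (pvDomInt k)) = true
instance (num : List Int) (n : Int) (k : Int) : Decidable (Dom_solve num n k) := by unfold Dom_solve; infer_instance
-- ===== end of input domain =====

-- B replaces A's repeated digit-value recomputation (cal) by a segment-value table precomputed once, and A's 2-D dp table by a rolling 1-D column (objective: alternative algorithm, same measured cost).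

-- ===== PORT A =====
-- cal's while-loop: one step per index from i to j
def calGo (num : List Int) : Nat → Int → Int → Int
  | 0, _, value => value
  | f + 1, i, value => calGo num f (i + 1) (value * 10 + PySem.List.pyGetD num i 0)

def cal (num : List Int) (i j : Int) : Int := calGo num (j - i + 1).toNat i 0

-- dp[i][0] = cal(num, 0, i)
def aFill (num : List Int) (dp : List (List Int)) (i : Int) : List (List Int) :=
  PySem.List.pySetD dp i (PySem.List.pySetD (PySem.List.pyGetD dp i []) 0 (cal num 0 i))

-- max([dp[m][j-1] * cal(num, m+1, i) for m in range(i)])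
def aCell (num : List Int) (dp : List (List Int)) (j i : Int) : Int :=
  (PySem.List.max? ((PySem.List.pyRange 0 i 1).map
    (fun m => PySem.List.pyGetD (PySem.List.pyGetD dp m []) (j - 1) 0 * cal num (m + 1) i))
    (fun y => y)).getD 0

-- inner loop 'for i in range(j, n)'
def aCol (num : List Int) (n : Int) (dp : List (List Int)) (j : Int) : List (List Int) :=
  (PySem.List.pyRange j n 1).foldl (fun dp i =>
    PySem.List.pySetD dp i (PySem.List.pySetD (PySem.List.pyGetD dp i []) j (aCell num dp j i))) dp

def solve (num : List Int) (n : Int) (k : Int) : Int :=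
  if k > n then 0
  else
    PySem.List.pyGetD (PySem.List.pyGetD
      ((PySem.List.pyRange 1 k 1).foldl (aCol num n)
        ((PySem.List.pyRange 0 n 1).foldl (aFill num)
          (List.replicate n.toNat (List.replicate k.toNat 0))))
      (n - 1) []) (k - 1) 0

-- ===== PORT B =====
-- val[i] = [0]*i followed by the running values v = v*10 + num[j] for j in range(i, n)
def bVal (num : List Int) (n : Int) : List (List Int) :=
  (PySem.List.pyRange 0 n 1).foldl (fun val i =>
    val ++ [((PySem.List.pyRange i n 1).foldl
      (fun (s : Int × List Int) jj =>
        (s.1 * 10 + PySem.List.pyGetD num jj 0, s.2 ++ [s.1 * 10 + PySem.List.pyGetD num jj 0]))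
      ((0 : Int), List.replicate i.toNat (0 : Int))).2]) []

-- one pass of the rolling column: cur from prev
def bCol (n : Int) (val : List (List Int)) (prev : List Int) (j : Int) : List Int :=
  (PySem.List.pyRange 0 n 1).foldl (fun cur i =>
    if i < j then cur ++ [(0 : Int)]
    else cur ++ [(PySem.List.max? ((PySem.List.pyRange 0 i 1).map
      (fun m => PySem.List.pyGetD prev m 0 *
        PySem.List.pyGetD (PySem.List.pyGetD val (m + 1) []) i 0)) (fun y => y)).getD 0]) []

def solve_alt (num : List Int) (n : Int) (k : Int) : Int :=
  if k > n then 0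
  else
    PySem.List.pyGetD
      ((PySem.List.pyRange 1 k 1).foldl (bCol n (bVal num n))
        (PySem.List.pyGetD (bVal num n) 0 []))
      (n - 1) 0

-- ===== PRECONDITION & SPEC =====
-- Pre_ excludes exactly the inputs on which A raises (IndexError): k ≤ n with n ≤ 0, k ≤ 0, or fewer than n digits.
def Pre_solve (num : List Int) (n : Int) (k : Int) : Prop :=
  k > n ∨ (1 ≤ k ∧ k ≤ n ∧ n ≤ (num.length : Int))
instance (num : List Int) (n : Int) (k : Int) : Decidable (Pre_solve num n k) := by
  unfold Pre_solve; infer_instance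

def pvWitness_solve : List Int × Int × Int := ([2, 3, 1], 3, 2)

def Spec_solve (num : List Int) (n : Int) (k : Int) (out : Int) : Prop := out = solve_alt num n k
instance (num : List Int) (n : Int) (k : Int) (out : Int) : Decidable (Spec_solve num n k out) := by
  unfold Spec_solve; infer_instance

-- ===== CLAIM (what is proved, stated in full; the proofs are below) =====
def Claim_equal_solve : Prop := ∀ (num : List Int) (n : Int) (k : Int),
  Dom_solve num n k → Pre_solve num n k → Spec_solve num n k (solve num n k)

-- ===== LEMMAS AND PROOFS =====

def segValLen (num : List Int) (i t : Nat) : Int :=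
  ((num.drop i).take t).foldl (fun v d => v * 10 + d) 0

def segVal (num : List Int) (i j : Nat) : Int := segValLen num i (j + 1 - i)

lemma segValLen_succ (num : List Int) (i t : Nat) (h : i + t < num.length) :
    segValLen num i (t + 1) = segValLen num i t * 10 + num[i + t] := by
  unfold segValLen
  rw [List.take_add_one, List.foldl_append]
  have h1 : (num.drop i)[t]? = some num[i + t] := by
    rw [List.getElem?_drop]
    exact List.getElem?_eq_getElem h
  rw [h1]
  simp

lemma calGo_eq (num : List Int) : ∀ (f : Nat) (i v : Int), 0 ≤ i → i.toNat + f ≤ num.length →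
    calGo num f i v = ((num.drop i.toNat).take f).foldl (fun a d => a * 10 + d) v := by
  intro f
  induction f with
  | zero => intro i v _ _; simp [calGo]
  | succ f ih =>
    intro i v hi hlen
    have hil : i.toNat < num.length := by omega
    have hsucc : (i + 1).toNat = i.toNat + 1 := by omega
    rw [calGo, ih (i + 1) _ (by omega) (by omega)]
    rw [List.drop_eq_getElem_cons hil, List.take_succ_cons, List.foldl_cons]
    rw [hsucc]
    have hg : PySem.List.pyGetD num i 0 = num[i.toNat] :=
      PySem.List.pyGetD_eq_getElem num 0 hi (by omega)
    rw [hg]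

lemma cal_eq (num : List Int) (a b : Int) (ha : 0 ≤ a) (hab : a ≤ b) (hb : b < (num.length : Int)) :
    cal num a b = segVal num a.toNat b.toNat := by
  unfold cal segVal segValLen
  have h1 : (b - a + 1).toNat = b.toNat + 1 - a.toNat := by omega
  rw [h1, calGo_eq num _ a 0 ha (by omega)]

def maxL (xs : List Int) : Int := (PySem.List.max? xs (fun y => y)).getD 0

def dpSpec (num : List Int) : Nat → Nat → Int
  | 0, i => segVal num 0 i
  | j + 1, i =>
    if i < j + 1 then 0
    else maxL ((List.range i).map (fun m => dpSpec num j m * segVal num (m + 1) i))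

def rowF (num : List Int) (N i : Nat) : List Int :=
  List.replicate i 0 ++ (List.range (N - i)).map (fun s => segVal num i (i + s))

lemma pyRange_zero_eq (n : Int) : PySem.List.pyRange 0 n 1 = (List.range n.toNat).map (fun (k : Nat) => (k : Int)) := by
  rw [PySem.List.pyRange_one]
  simp only [Int.sub_zero]
  exact List.map_congr_left (fun a _ => by omega)

lemma segValLen_zero (num : List Int) (i : Nat) : segValLen num i 0 = 0 := by
  simp [segValLen]

lemma bRow_aux (num : List Int) (i : Nat) :
    ∀ t : Nat, i + t ≤ num.length →
    ((List.range t).map (fun (s : Nat) => (i : Int) + (s : Int))).foldl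
      (fun (s : Int × List Int) jj =>
        (s.1 * 10 + PySem.List.pyGetD num jj 0, s.2 ++ [s.1 * 10 + PySem.List.pyGetD num jj 0]))
      ((0 : Int), List.replicate i (0 : Int)) =
    (segValLen num i t, List.replicate i 0 ++ (List.range t).map (fun s => segVal num i (i + s))) := by
  intro t
  induction t with
  | zero => intro _; simp [segValLen_zero]
  | succ t ih =>
    intro ht
    rw [List.range_succ, List.map_append, List.foldl_append, ih (by omega)]
    simp only [List.map_cons, List.map_nil, List.foldl_cons, List.foldl_nil]
    have hcast : ((i : Int) + (t : Int)) = ((i + t : Nat) : Int) := by push_cast; ring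
    have hget : PySem.List.pyGetD num ((i : Int) + (t : Int)) 0 = num[i + t]'(by omega) := by
      rw [hcast, PySem.List.pyGetD_natCast, List.getD_eq_getElem _ _ (by omega)]
    rw [hget]
    have hv : segVal num i (i + t) = segValLen num i t * 10 + num[i + t]'(by omega) := by
      rw [show segVal num i (i + t) = segValLen num i (t + 1) by unfold segVal; congr 1; omega]
      exact segValLen_succ num i t (by omega)
    rw [Prod.mk.injEq]
    refine ⟨(segValLen_succ num i t (by omega)).symm, ?_⟩
    rw [List.map_append, List.map_cons, List.map_nil, ← List.append_assoc, hv]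

lemma bVal_eq (num : List Int) (n : Int) (h3 : n ≤ (num.length : Int)) :
    bVal num n = (List.range n.toNat).map (rowF num n.toNat) := by
  unfold bVal
  rw [pyRange_zero_eq, List.foldl_map]
  simp only [PySem.List.foldl_append_singleton_eq_map]
  rw [List.nil_append]
  apply List.map_congr_left
  intro i hi
  rw [List.mem_range] at hi
  rw [PySem.List.pyRange_one]
  have h1 : (n - (i : Int)).toNat = n.toNat - i := by omega
  rw [h1, Int.toNat_natCast]
  rw [bRow_aux num i (n.toNat - i) (by omega)]
  unfold rowF
  rfl

lemma val_read (num : List Int) (n : Int) (h3 : n ≤ (num.length : Int)) (a b : Nat)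
    (hab : a ≤ b) (hb : b < n.toNat) :
    PySem.List.pyGetD (PySem.List.pyGetD (bVal num n) (a : Int) []) (b : Int) 0 = segVal num a b := by
  rw [bVal_eq num n h3, PySem.List.pyGetD_natCast, PySem.List.pyGetD_natCast]
  rw [PySem.List.getD_map_range _ _ _ _ (by omega)]
  unfold rowF
  rw [List.getD_append_right _ _ _ _ (by simp only [List.length_replicate]; omega)]
  simp only [List.length_replicate]
  rw [PySem.List.getD_map_range _ _ _ _ (by omega)]
  congr 1
  omega

lemma bCol_eq (num : List Int) (n : Int) (h3 : n ≤ (num.length : Int)) (t : Nat) :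
    bCol n (bVal num n) ((List.range n.toNat).map (fun i => dpSpec num t i)) ((1 : Int) + (t : Int)) =
    (List.range n.toNat).map (fun i => dpSpec num (t + 1) i) := by
  unfold bCol
  rw [pyRange_zero_eq n, List.foldl_map]
  have hsplit : ∀ (cur : List Int) (i : Int),
      (if i < (1 : Int) + (t : Int) then cur ++ [(0 : Int)]
       else cur ++ [(PySem.List.max? ((PySem.List.pyRange 0 i 1).map
         (fun m => PySem.List.pyGetD ((List.range n.toNat).map (fun i => dpSpec num t i)) m 0 *
           PySem.List.pyGetD (PySem.List.pyGetD (bVal num n) (m + 1) []) i 0)) (fun y => y)).getD 0]) =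
      cur ++ [if i < (1 : Int) + (t : Int) then (0 : Int)
       else (PySem.List.max? ((PySem.List.pyRange 0 i 1).map
         (fun m => PySem.List.pyGetD ((List.range n.toNat).map (fun i => dpSpec num t i)) m 0 *
           PySem.List.pyGetD (PySem.List.pyGetD (bVal num n) (m + 1) []) i 0)) (fun y => y)).getD 0] := by
    intro cur i; split <;> rfl
  simp only [hsplit, PySem.List.foldl_append_singleton_eq_map, List.nil_append]
  apply List.map_congr_left
  intro i hi
  rw [List.mem_range] at hi
  by_cases hit : i < t + 1
  · rw [if_pos (by omega)]
    simp [dpSpec, hit]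
  · rw [if_neg (by omega)]
    have hd : dpSpec num (t + 1) i =
        maxL ((List.range i).map (fun m => dpSpec num t m * segVal num (m + 1) i)) := by
      simp [dpSpec, hit]
    rw [hd]
    unfold maxL
    congr 1
    rw [PySem.List.pyRange_zero_natCast i, List.map_map]
    refine congrArg (fun xs => PySem.List.max? xs (fun y => y)) ?_
    apply List.map_congr_left
    intro m hm
    rw [List.mem_range] at hm
    simp only [Function.comp]
    rw [PySem.List.pyGetD_natCast, PySem.List.getD_map_range _ _ _ _ (by omega)]
    rw [show ((m : Int) + 1) = ((m + 1 : Nat) : Int) by push_cast; ring]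
    rw [val_read num n h3 (m + 1) i (by omega) (by omega)]

lemma prev0_eq (num : List Int) (n : Int) (h3 : n ≤ (num.length : Int)) (hn : 1 ≤ n) :
    PySem.List.pyGetD (bVal num n) 0 [] = (List.range n.toNat).map (fun i => dpSpec num 0 i) := by
  rw [bVal_eq num n h3, PySem.List.pyGetD_zero, List.getD_eq_getElem _ _ (by simp; omega)]
  rw [List.getElem_map, List.getElem_range]
  simp [rowF, dpSpec]

lemma bPrev_loop (num : List Int) (n : Int) (h3 : n ≤ (num.length : Int)) :
    ∀ t, t < n.toNat →
    ((List.range t).map (fun (s : Nat) => (1 : Int) + (s : Int))).foldl (bCol n (bVal num n))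
      ((List.range n.toNat).map (fun i => dpSpec num 0 i)) =
    (List.range n.toNat).map (fun i => dpSpec num t i) := by
  intro t
  induction t with
  | zero => intro _; simp
  | succ t ih =>
    intro ht
    rw [List.range_succ, List.map_append, List.foldl_append, ih (by omega)]
    simp only [List.map_cons, List.map_nil, List.foldl_cons, List.foldl_nil]
    exact bCol_eq num n h3 t

theorem solveB_eq (num : List Int) (n k : Int) (h1 : 1 ≤ k) (h2 : k ≤ n)
    (h3 : n ≤ (num.length : Int)) :
    solve_alt num n k = dpSpec num (k.toNat - 1) (n.toNat - 1) := by
  unfold solve_alt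
  rw [if_neg (by omega)]
  rw [show PySem.List.pyRange 1 k 1 =
      (List.range (k.toNat - 1)).map (fun (s : Nat) => (1 : Int) + (s : Int)) from by
    rw [PySem.List.pyRange_one]; congr 2; omega]
  rw [prev0_eq num n h3 (by omega)]
  rw [bPrev_loop num n h3 (k.toNat - 1) (by omega)]
  rw [show (n - 1 : Int) = ((n.toNat - 1 : Nat) : Int) by omega]
  rw [PySem.List.pyGetD_natCast, PySem.List.getD_map_range _ _ _ _ (by omega)]

def DpInv (N K : Nat) (E : Nat → Nat → Int) (dp : List (List Int)) : Prop :=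
  dp.length = N ∧ ∀ r, r < N → (dp.getD r []).length = K ∧ ∀ c, c < K → (dp.getD r []).getD c 0 = E r c

lemma DpInv_congr {N K : Nat} {E E' : Nat → Nat → Int} {dp : List (List Int)}
    (h : DpInv N K E dp) (he : ∀ r, r < N → ∀ c, c < K → E r c = E' r c) : DpInv N K E' dp := by
  obtain ⟨h1, h2⟩ := h
  refine ⟨h1, fun r hr => ⟨(h2 r hr).1, fun c hc => ?_⟩⟩
  rw [(h2 r hr).2 c hc, he r hr c hc]

lemma pyGetD_eq_getD (dp : List (List Int)) (r : Int) (hr0 : 0 ≤ r) (hr : r.toNat < dp.length) :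
    PySem.List.pyGetD dp r [] = dp.getD r.toNat [] := by
  rw [PySem.List.pyGetD_eq_getElem dp [] hr0 (by omega), List.getD_eq_getElem _ _ hr]

lemma DpInv_read {N K : Nat} {E : Nat → Nat → Int} {dp : List (List Int)}
    (h : DpInv N K E dp) (r c : Int) (hr0 : 0 ≤ r) (hrN : r.toNat < N)
    (hc0 : 0 ≤ c) (hcK : c.toNat < K) :
    PySem.List.pyGetD (PySem.List.pyGetD dp r []) c 0 = E r.toNat c.toNat := by
  obtain ⟨hlen, hrow⟩ := h
  obtain ⟨hrlen, hent⟩ := hrow r.toNat hrN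
  rw [pyGetD_eq_getD dp r hr0 (by omega)]
  rw [PySem.List.pyGetD_eq_getElem _ 0 hc0 (by omega)]
  rw [← List.getD_eq_getElem _ 0 (by omega)]
  exact hent c.toNat hcK

lemma DpInv_update {N K : Nat} {E : Nat → Nat → Int} {dp : List (List Int)}
    (h : DpInv N K E dp) (r c : Int) (v : Int) (hr0 : 0 ≤ r) (hrN : r.toNat < N)
    (hc0 : 0 ≤ c) (_hcK : c.toNat < K) :
    DpInv N K (fun r' c' => if r' = r.toNat ∧ c' = c.toNat then v else E r' c')
      (PySem.List.pySetD dp r (PySem.List.pySetD (PySem.List.pyGetD dp r []) c v)) := by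
  obtain ⟨hlen, hrow⟩ := h
  obtain ⟨hrlen, hent⟩ := hrow r.toNat hrN
  rw [pyGetD_eq_getD dp r hr0 (by omega)]
  rw [PySem.List.pySetD_of_nonneg _ _ hc0, PySem.List.pySetD_of_nonneg _ _ hr0]
  have hrowget : ∀ c', c' < K → ((dp.getD r.toNat []).set c.toNat v).getD c' 0 =
      if c.toNat = c' then v else E r.toNat c' := by
    intro c' hc'
    rw [List.getD_eq_getElem _ _ (by rw [List.length_set]; omega), List.getElem_set]
    by_cases hceq : c.toNat = c'
    · simp [hceq]
    · rw [if_neg hceq, if_neg hceq, ← hent c' hc']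
      exact (List.getD_eq_getElem (dp.getD r.toNat []) 0 (n := c') (by omega)).symm
  refine ⟨by simp [hlen], ?_⟩
  intro r' hr'
  have hget : (dp.set r.toNat ((dp.getD r.toNat []).set c.toNat v)).getD r' [] =
      if r.toNat = r' then (dp.getD r.toNat []).set c.toNat v else dp.getD r' [] := by
    rw [List.getD_eq_getElem _ _ (by rw [List.length_set]; omega), List.getElem_set]
    by_cases hreq : r.toNat = r'
    · rw [if_pos hreq, if_pos hreq]
    · rw [if_neg hreq, if_neg hreq]
      exact (List.getD_eq_getElem dp [] (n := r') (by omega)).symm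
  rw [hget]
  by_cases hreq : r.toNat = r'
  · rw [if_pos hreq]
    refine ⟨by rw [List.length_set]; exact hrlen, ?_⟩
    intro c' hc'
    rw [hrowget c' hc']
    beta_reduce
    by_cases hceq : c.toNat = c'
    · rw [if_pos hceq, if_pos (by omega)]
    · rw [if_neg hceq, if_neg (by omega)]
      rw [← hreq]
  · rw [if_neg hreq]
    obtain ⟨hrlen', hent'⟩ := hrow r' hr'
    refine ⟨hrlen', fun c' hc' => ?_⟩
    rw [hent' c' hc']
    beta_reduce
    rw [if_neg (by omega)]

def E1 (num : List Int) (t : Nat) (r c : Nat) : Int :=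
  if r < t ∧ c = 0 then segVal num 0 r else 0

def Efull (num : List Int) (j : Nat) (r c : Nat) : Int :=
  if c ≤ j then dpSpec num c r else 0

def Einner (num : List Int) (j t : Nat) (r c : Nat) : Int :=
  if c < j then dpSpec num c r
  else if c = j ∧ r < j + t then dpSpec num j r else 0

lemma DpInv_init (N K : Nat) :
    DpInv N K (fun _ _ => 0) (List.replicate N (List.replicate K (0 : Int))) := by
  refine ⟨by simp, fun r hr => ?_⟩
  rw [List.getD_eq_getElem _ _ (by simp [hr]), List.getElem_replicate]
  exact ⟨by simp, fun c hc => by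
    rw [List.getD_eq_getElem _ _ (by simp [hc]), List.getElem_replicate]⟩

lemma aFill_loop (num : List Int) (n k : Int) (h1 : 1 ≤ k) (h3 : n ≤ (num.length : Int)) :
    ∀ t, t ≤ n.toNat →
    DpInv n.toNat k.toNat (E1 num t)
      (((List.range t).map (fun (s : Nat) => (s : Int))).foldl (aFill num)
        (List.replicate n.toNat (List.replicate k.toNat 0))) := by
  intro t
  induction t with
  | zero =>
    intro _
    exact DpInv_congr (DpInv_init _ _) (fun r _ c _ => by simp [E1])
  | succ t ih =>
    intro ht
    rw [List.range_succ, List.map_append, List.foldl_append]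
    simp only [List.map_cons, List.map_nil, List.foldl_cons, List.foldl_nil]
    set dpT := ((List.range t).map (fun (s : Nat) => (s : Int))).foldl (aFill num)
      (List.replicate n.toNat (List.replicate k.toNat 0)) with hdpT
    unfold aFill
    have hupd := DpInv_update (ih (by omega)) (t : Int) 0 (cal num 0 (t : Int))
      (by omega) (by omega) (by omega) (by omega)
    have hcal : cal num 0 (t : Int) = segVal num 0 t := by
      rw [cal_eq num 0 (t : Int) (by omega) (by omega) (by omega)]
      simp
    rw [hcal] at hupd ⊢
    refine DpInv_congr hupd (fun r hr c hc => ?_)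
    beta_reduce
    simp only [Int.toNat_natCast, Int.toNat_zero]
    unfold E1
    by_cases hr1 : r = t ∧ c = 0
    · rw [if_pos hr1]
      obtain ⟨hrt, hc0⟩ := hr1
      rw [if_pos (by omega)]
      congr 1
      omega
    · rw [if_neg hr1]
      by_cases hr2 : r < t ∧ c = 0
      · rw [if_pos hr2, if_pos (by omega)]
      · rw [if_neg hr2, if_neg (by omega)]

lemma dpSpec_small (num : List Int) (j r : Nat) (h : r < j + 1) : dpSpec num (j + 1) r = 0 := by
  simp [dpSpec, h]

lemma aCol_loop (num : List Int) (n k : Int) (h3 : n ≤ (num.length : Int)) (jj : Nat)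
    (hjK : jj + 1 < k.toNat) (hKN : k.toNat ≤ n.toNat) (dp : List (List Int))
    (hdp : DpInv n.toNat k.toNat (Einner num (jj + 1) 0) dp) :
    ∀ t, jj + 1 + t ≤ n.toNat →
    DpInv n.toNat k.toNat (Einner num (jj + 1) t)
      (((List.range t).map (fun (s : Nat) => ((jj + 1 : Nat) : Int) + (s : Int))).foldl
        (fun dp i => PySem.List.pySetD dp i
          (PySem.List.pySetD (PySem.List.pyGetD dp i [])
            ((jj + 1 : Nat) : Int) (aCell num dp ((jj + 1 : Nat) : Int) i))) dp) := by
  intro t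
  induction t with
  | zero => intro _; exact hdp
  | succ t ih =>
    intro ht
    rw [List.range_succ, List.map_append, List.foldl_append]
    simp only [List.map_cons, List.map_nil, List.foldl_cons, List.foldl_nil]
    set dpT := ((List.range t).map (fun (s : Nat) => ((jj + 1 : Nat) : Int) + (s : Int))).foldl
        (fun dp i => PySem.List.pySetD dp i
          (PySem.List.pySetD (PySem.List.pyGetD dp i [])
            ((jj + 1 : Nat) : Int) (aCell num dp ((jj + 1 : Nat) : Int) i))) dp with hdpT
    have hT := ih (by omega)
    have hcast : (((jj + 1 : Nat) : Int) + (t : Int)) = ((jj + 1 + t : Nat) : Int) := by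
      push_cast; ring
    rw [hcast]
    have hcell : aCell num dpT ((jj + 1 : Nat) : Int) ((jj + 1 + t : Nat) : Int) =
        dpSpec num (jj + 1) (jj + 1 + t) := by
      unfold aCell
      have hd : dpSpec num (jj + 1) (jj + 1 + t) =
          maxL ((List.range (jj + 1 + t)).map
            (fun m => dpSpec num jj m * segVal num (m + 1) (jj + 1 + t))) := by
        simp [dpSpec, show ¬(jj + 1 + t < jj + 1) by omega]
      rw [hd]
      unfold maxL
      refine congrArg (fun xs => (PySem.List.max? xs (fun y => y)).getD 0) ?_
      rw [PySem.List.pyRange_zero_natCast, List.map_map]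
      apply List.map_congr_left
      intro m hm
      rw [List.mem_range] at hm
      simp only [Function.comp]
      rw [show (((jj + 1 : Nat) : Int) - 1) = ((jj : Nat) : Int) by push_cast; ring]
      rw [DpInv_read hT (m : Int) ((jj : Nat) : Int) (by omega) (by omega) (by omega) (by omega)]
      rw [show ((m : Int) + 1) = ((m + 1 : Nat) : Int) by push_cast; ring]
      rw [cal_eq num _ _ (by omega) (by omega) (by omega)]
      simp only [Int.toNat_natCast]
      unfold Einner
      rw [if_pos (by omega)]
    rw [hcell]
    have hupd := DpInv_update hT ((jj + 1 + t : Nat) : Int) ((jj + 1 : Nat) : Int)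
      (dpSpec num (jj + 1) (jj + 1 + t)) (by omega) (by omega) (by omega) (by omega)
    refine DpInv_congr hupd (fun r hr c hc => ?_)
    beta_reduce
    simp only [Int.toNat_natCast]
    unfold Einner
    by_cases h1 : r = jj + 1 + t ∧ c = jj + 1
    · rw [if_pos h1]
      obtain ⟨hrv, hcv⟩ := h1
      rw [if_neg (by omega), if_pos (by omega)]
      congr 1
      omega
    · rw [if_neg h1]
      by_cases h2 : c < jj + 1
      · rw [if_pos h2, if_pos h2]
      · rw [if_neg h2, if_neg h2]
        by_cases h3' : c = jj + 1 ∧ r < jj + 1 + t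
        · rw [if_pos h3', if_pos (by omega)]
        · rw [if_neg h3', if_neg (by omega)]

lemma aOuter_loop (num : List Int) (n k : Int) (h1 : 1 ≤ k) (h2 : k ≤ n)
    (h3 : n ≤ (num.length : Int)) :
    ∀ u, u ≤ k.toNat - 1 →
    DpInv n.toNat k.toNat (Efull num u)
      (((List.range u).map (fun (s : Nat) => (1 : Int) + (s : Int))).foldl (aCol num n)
        (((List.range n.toNat).map (fun (s : Nat) => (s : Int))).foldl (aFill num)
          (List.replicate n.toNat (List.replicate k.toNat 0)))) := by
  intro u
  induction u with
  | zero =>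
    intro _
    refine DpInv_congr (aFill_loop num n k h1 h3 n.toNat le_rfl) (fun r hr c hc => ?_)
    unfold E1 Efull
    by_cases hc0 : c = 0
    · rw [if_pos ⟨hr, hc0⟩, if_pos (by omega), hc0]
      simp [dpSpec]
    · rw [if_neg (by tauto), if_neg (by omega)]
  | succ u ih =>
    intro hu
    rw [List.range_succ, List.map_append, List.foldl_append]
    simp only [List.map_cons, List.map_nil, List.foldl_cons, List.foldl_nil]
    have hcast : ((1 : Int) + (u : Int)) = ((u + 1 : Nat) : Int) := by push_cast; ring
    unfold aCol
    rw [hcast]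
    rw [show PySem.List.pyRange ((u + 1 : Nat) : Int) n 1 =
        (List.range (n.toNat - (u + 1))).map
          (fun (s : Nat) => ((u + 1 : Nat) : Int) + (s : Int)) from by
      rw [PySem.List.pyRange_one]; congr 2; omega]
    have hdp0 : DpInv n.toNat k.toNat (Einner num (u + 1) 0)
        (((List.range u).map (fun (s : Nat) => (1 : Int) + (s : Int))).foldl (aCol num n)
          (((List.range n.toNat).map (fun (s : Nat) => (s : Int))).foldl (aFill num)
            (List.replicate n.toNat (List.replicate k.toNat 0)))) := by
      refine DpInv_congr (ih (by omega)) (fun r hr c hc => ?_)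
      unfold Efull Einner
      by_cases hcu : c < u + 1
      · rw [if_pos (by omega), if_pos hcu]
      · rw [if_neg (by omega), if_neg hcu]
        by_cases hcr : c = u + 1 ∧ r < u + 1 + 0
        · rw [if_pos hcr, dpSpec_small num u r (by omega)]
        · rw [if_neg hcr]
    have hres := aCol_loop num n k h3 u (by omega) (by omega) _ hdp0
      (n.toNat - (u + 1)) (by omega)
    refine DpInv_congr hres (fun r hr c hc => ?_)
    unfold Einner Efull
    by_cases hcu : c < u + 1
    · rw [if_pos hcu, if_pos (by omega)]
    · rw [if_neg hcu]
      by_cases hcr : c = u + 1 ∧ r < u + 1 + (n.toNat - (u + 1))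
      · rw [if_pos hcr, if_pos (by omega), hcr.1]
      · rw [if_neg hcr, if_neg (by omega)]

theorem solveA_eq (num : List Int) (n k : Int) (h1 : 1 ≤ k) (h2 : k ≤ n)
    (h3 : n ≤ (num.length : Int)) :
    solve num n k = dpSpec num (k.toNat - 1) (n.toNat - 1) := by
  unfold solve
  rw [if_neg (by omega)]
  rw [pyRange_zero_eq n]
  rw [show PySem.List.pyRange 1 k 1 =
      (List.range (k.toNat - 1)).map (fun (s : Nat) => (1 : Int) + (s : Int)) from by
    rw [PySem.List.pyRange_one]; congr 2; omega]
  have hres := aOuter_loop num n k h1 h2 h3 (k.toNat - 1) le_rfl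
  rw [show (n - 1 : Int) = ((n.toNat - 1 : Nat) : Int) by omega]
  rw [show (k - 1 : Int) = ((k.toNat - 1 : Nat) : Int) by omega]
  rw [DpInv_read hres _ _ (by omega) (by omega) (by omega) (by omega)]
  simp only [Int.toNat_natCast]
  unfold Efull
  rw [if_pos le_rfl]

-- ===== VERDICT (by name: the statement is the Claim_ definition above) =====
theorem solve_spec : Claim_equal_solve := by
  intro num n k _hdom hpre
  unfold Spec_solve
  rcases hpre with h | ⟨h1, h2, h3⟩
  · unfold solve solve_alt
    rw [if_pos h, if_pos h]
  · rw [solveA_eq num n k h1 h2 h3, solveB_eq num n k h1 h2 h3]
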